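-- pv_equiv track=rewrite | github.com/mahmoudimus/lichen-lang | deducer.py | _get_types_for_usage
-- ===== SOURCE A (Python) =====
-- def _get_types_for_usage(usage, attr_types, attrs):
--
--     """
--     For the given 'usage' representing attribute usage, return types
--     recorded in the 'attr_types' attribute-to-types mapping that support
--     such usage, with the given 'attrs' type-to-attributes mapping used to
--     quickly assess whether a type supports all of the stated attributes.
--     """
--
--     # Where no attributes are used, any type would be acceptable.
--
--     if not usage:
--         return attrs.keys()
--
--     keys = []
--     for attrname, invocation, assignment in usage:
--         keys.append((attrname, assignment))
--
--     # Obtain types supporting the first (attribute name, assignment) key...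
--
--     types = set(attr_types.get(keys[0]) or [])
--
--     for key in keys[1:]:
--
--         # Record types that support all of the other attributes as well.
--
--         types.intersection_update(attr_types.get(key) or [])
--
--     return types
-- ===== SOURCE B (Python) =====
-- def _get_types_for_usage(usage, attr_types, attrs):
--
--     # Where no attributes are used, any type would be acceptable.
--
--     if not usage:
--         return attrs.keys()
--
--     # Count, for each type, how many of the usage keys it supports,
--     # then keep the types supporting all of them.
--
--     counts = {}
--     for attrname, invocation, assignment in usage:
--         for t in set(attr_types.get((attrname, assignment)) or []):
--             counts[t] = counts.get(t, 0) + 1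
--
--     n = len(usage)
--     return {t for t, c in counts.items() if c == n}
-- ===== Notes on version B (the rewrite author's own statement) =====
-- stated objective: alternative
-- what changed: Replaces the seed-set-plus-repeated-intersection_update loop by a single counting pass (a dict counting, per type, how many usage keys support it) followed by a threshold filter keeping types whose count equals the number of usage entries.
import Mathlib
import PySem

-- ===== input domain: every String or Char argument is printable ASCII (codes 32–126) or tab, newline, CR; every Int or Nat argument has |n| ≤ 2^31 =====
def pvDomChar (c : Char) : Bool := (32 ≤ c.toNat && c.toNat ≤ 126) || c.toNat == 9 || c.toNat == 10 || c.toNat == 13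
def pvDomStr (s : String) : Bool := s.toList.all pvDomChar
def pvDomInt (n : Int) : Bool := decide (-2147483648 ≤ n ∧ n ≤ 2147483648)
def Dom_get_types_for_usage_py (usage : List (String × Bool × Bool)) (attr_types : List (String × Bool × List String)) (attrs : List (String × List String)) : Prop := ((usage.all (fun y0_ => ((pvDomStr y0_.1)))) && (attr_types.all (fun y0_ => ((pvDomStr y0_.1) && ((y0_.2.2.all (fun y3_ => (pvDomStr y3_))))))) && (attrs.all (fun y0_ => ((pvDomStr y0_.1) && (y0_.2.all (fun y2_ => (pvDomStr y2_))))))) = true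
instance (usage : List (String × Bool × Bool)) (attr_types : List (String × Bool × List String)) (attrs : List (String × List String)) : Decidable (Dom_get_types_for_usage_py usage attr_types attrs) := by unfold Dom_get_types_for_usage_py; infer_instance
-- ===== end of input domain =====

-- B replaces repeated set intersection by one counting pass with a threshold filter (alternative decomposition, same cost).


-- ===== PORT A =====
-- attr_types.get((attrname, assignment)) or []  (dict lookup = first match in the association list; missing or empty → [])
def pvLookup (attr_types : List (String × Bool × List String)) (key : String × Bool) : List String :=
  match attr_types.find? (fun p => p.1 == key.1 && p.2.1 == key.2) with
  | some p => p.2.2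
  | none => []

def get_types_for_usage_py (usage : List (String × Bool × Bool)) (attr_types : List (String × Bool × List String)) (attrs : List (String × List String)) : List String :=
  if usage.isEmpty then PySem.List.dedup (attrs.map (·.1))  -- attrs.keys()
  else
    let keys := usage.map (fun u => (u.1, u.2.2))
    -- types = set(attr_types.get(keys[0]) or [])
    let types := PySem.Set.ofList (pvLookup attr_types (keys.headD ("", false)))
    -- for key in keys[1:]: types.intersection_update(attr_types.get(key) or [])
    (keys.drop 1).foldl (fun ts key => PySem.Set.inter ts (pvLookup attr_types key)) types

-- ===== PORT B =====
def get_types_for_usage_py_alt (usage : List (String × Bool × Bool)) (attr_types : List (String × Bool × List String)) (attrs : List (String × List String)) : List String :=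
  if usage.isEmpty then PySem.List.dedup (attrs.map (·.1))  -- attrs.keys()
  else
    let counts := usage.foldl (fun d u =>
      (PySem.Set.ofList (pvLookup attr_types (u.1, u.2.2))).foldl
        (fun d t => d.insert t (d.getD t 0 + 1)) d) PySem.Dict.empty
    let n : Int := usage.length
    PySem.Set.ofList ((counts.items.filter (fun p => p.2 == n)).map (·.1))

-- ===== PRECONDITION & SPEC =====
def Spec_get_types_for_usage_py (usage : List (String × Bool × Bool)) (attr_types : List (String × Bool × List String)) (attrs : List (String × List String)) (out : List String) : Prop := out = get_types_for_usage_py_alt usage attr_types attrs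
instance (usage : List (String × Bool × Bool)) (attr_types : List (String × Bool × List String)) (attrs : List (String × List String)) (out : List String) : Decidable (Spec_get_types_for_usage_py usage attr_types attrs out) := by unfold Spec_get_types_for_usage_py; infer_instance

-- ===== CLAIM (what is proved, stated in full; the proofs are below) =====
def Claim_equal_get_types_for_usage_py : Prop := ∀ (usage : List (String × Bool × Bool)) (attr_types : List (String × Bool × List String)) (attrs : List (String × List String)), Dom_get_types_for_usage_py usage attr_types attrs → Spec_get_types_for_usage_py usage attr_types attrs (get_types_for_usage_py usage attr_types attrs)

-- ===== LEMMAS AND PROOFS =====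

-- A's loop: a chain of intersections is one filter over the seed set.
theorem foldl_inter_eq_filter {A : Type} (vs : List A) (look : A → List String) (s : List String) :
    vs.foldl (fun ts v => PySem.Set.inter ts (look v)) s
      = s.filter (fun x => vs.all (fun v => (look v).contains x)) := by
  induction vs generalizing s with
  | nil => simp
  | cons v vs ih =>
      rw [List.foldl_cons, ih]
      show (PySem.Set.inter s (look v)).filter _ = _
      simp only [PySem.Set.inter, List.filter_filter, List.all_cons]
      apply List.filter_congr
      intro x _
      simp [Bool.and_comm]

-- set(l) counts each element at most once.
theorem count_ofList (l : List String) (v : String) :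
    (PySem.Set.ofList l).count v = if l.contains v then 1 else 0 := by
  by_cases h : v ∈ l
  · rw [List.count_eq_one_of_mem (PySem.Set.nodup_ofList l) ((PySem.Set.mem_ofList l v).mpr h)]
    simp [h]
  · rw [List.count_eq_zero_of_not_mem (fun hm => h ((PySem.Set.mem_ofList l v).mp hm))]
    simp [h]

-- B's counter: the count of a type is the number of usage entries whose key list contains it.
theorem getD_counts {A : Type} (vs : List A) (look : A → List String) (d : PySem.Dict String Int) (x : String) :
    (vs.foldl (fun d v => (PySem.Set.ofList (look v)).foldl (fun d t => d.insert t (d.getD t 0 + 1)) d) d).getD x 0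
      = d.getD x 0 + (vs.countP (fun v => (look v).contains x) : Int) := by
  induction vs generalizing d with
  | nil => simp
  | cons v vs ih =>
      rw [List.foldl_cons, ih, PySem.Dict.getD_foldl_insert_add_one, count_ofList]
      rw [List.countP_cons]
      rcases h : (look v).contains x
      · rw [if_neg (by simp [h])]
        push_cast; ring
      · rw [if_pos (by simp [h])]
        push_cast; ring

-- B's counter keys, as a fold of set updates.
theorem keys_counts {A : Type} (vs : List A) (look : A → List String) (d : PySem.Dict String Int) :
    (vs.foldl (fun d v => (PySem.Set.ofList (look v)).foldl (fun d t => d.insert t (d.getD t 0 + 1)) d) d).keys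
      = vs.foldl (fun ks v => PySem.Set.update ks (PySem.Set.ofList (look v))) d.keys := by
  induction vs generalizing d with
  | nil => rfl
  | cons v vs ih => rw [List.foldl_cons, ih, PySem.Dict.keys_foldl_insert, List.foldl_cons]

theorem nodup_keys_counts {A : Type} (vs : List A) (look : A → List String) (d : PySem.Dict String Int)
    (h : d.keys.Nodup) :
    (vs.foldl (fun d v => (PySem.Set.ofList (look v)).foldl (fun d t => d.insert t (d.getD t 0 + 1)) d) d).keys.Nodup := by
  induction vs generalizing d with
  | nil => exact h
  | cons v vs ih => exact ih _ (PySem.Dict.nodup_keys_foldl_insert _ _ _ h)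

theorem mem_update_left {x : String} (l s : List String) (h : x ∈ s) : x ∈ PySem.Set.update s l := by
  induction l generalizing s with
  | nil => exact h
  | cons y l ih => exact ih _ ((PySem.Set.mem_add _ _ _).mpr (Or.inl h))

-- updating with elements that cannot satisfy p (unless already present) does not change the filter
theorem filter_update (l s : List String) (p : String → Bool)
    (h : ∀ x ∈ l, p x = true → x ∈ s) :
    (PySem.Set.update s l).filter p = s.filter p := by
  induction l generalizing s with
  | nil => rfl
  | cons x l ih =>
      show (PySem.Set.update (PySem.Set.add s x) l).filter p = _
      rw [ih (PySem.Set.add s x) (fun y hy hp => (PySem.Set.mem_add _ _ _).mpr (Or.inl (h y (List.mem_cons_of_mem _ hy) hp)))]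
      unfold PySem.Set.add
      by_cases hc : x ∈ s
      · simp [hc]
      · have hpx : p x = false := by
          cases hp : p x
          · rfl
          · exact absurd (h x List.mem_cons_self hp) hc
        simp [hc, List.filter_append, hpx]

theorem filter_foldl_update {A : Type} (vs : List A) (g : A → List String) (s : List String) (p : String → Bool)
    (h : ∀ x, p x = true → x ∈ s) :
    (vs.foldl (fun ks v => PySem.Set.update ks (g v)) s).filter p = s.filter p := by
  induction vs generalizing s with
  | nil => rfl
  | cons v vs ih =>
      rw [List.foldl_cons, ih (PySem.Set.update s (g v)) (fun x hp => mem_update_left _ _ (h x hp)),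
        filter_update _ _ _ (fun x _ hp => h x hp)]

-- B's whole non-empty branch equals A's filter form.
theorem B_side_eq {A : Type} (look : A → List String) (u : A) (us : List A) :
    PySem.Set.ofList
        (((((u :: us).foldl (fun d v =>
              (PySem.Set.ofList (look v)).foldl (fun d t => d.insert t (d.getD t 0 + 1)) d)
            PySem.Dict.empty)).items.filter
          (fun p => p.2 == ((u :: us).length : Int))).map (·.1))
      = (PySem.Set.ofList (look u)).filter (fun x => us.all (fun v => (look v).contains x)) := by
  set D : PySem.Dict String Int := (u :: us).foldl (fun d v =>
      (PySem.Set.ofList (look v)).foldl (fun d t => d.insert t (d.getD t 0 + 1)) d)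
    PySem.Dict.empty with hD
  have hnd : D.keys.Nodup := nodup_keys_counts _ _ _ (by simp)
  have hgetD : ∀ x, D.getD x 0 = ((u :: us).countP (fun v => (look v).contains x) : Int) := by
    intro x; rw [hD, getD_counts]; simp
  have hkeys : D.keys = us.foldl (fun ks v => PySem.Set.update ks (PySem.Set.ofList (look v)))
      (PySem.Set.ofList (look u)) := by
    rw [hD, keys_counts, PySem.Dict.keys_empty, List.foldl_cons]
    rw [show PySem.Set.update ([] : List String) (PySem.Set.ofList (look u))
        = PySem.Set.ofList (look u) from by
      rw [PySem.Set.update, ← PySem.Set.ofList_eq_foldl, PySem.Set.ofList_ofList]]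
  -- the predicate on a key: it is counted in every usage entry
  have hpred : ∀ x, ((D.getD x 0 == ((u :: us).length : Int)) : Bool)
      = ((look u).contains x && us.all (fun v => (look v).contains x)) := by
    intro x
    rw [hgetD x, Bool.eq_iff_iff]
    simp only [beq_iff_eq, Bool.and_eq_true, List.all_eq_true]
    constructor
    · intro h
      have hc : (u :: us).countP (fun v => (look v).contains x) = (u :: us).length := by
        exact_mod_cast h
      have hall := List.countP_eq_length.mp hc
      exact ⟨hall u List.mem_cons_self, fun v hv => hall v (List.mem_cons_of_mem _ hv)⟩
    · rintro ⟨h1, h2⟩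
      have hc : (u :: us).countP (fun v => (look v).contains x) = (u :: us).length :=
        List.countP_eq_length.mpr (List.forall_mem_cons.mpr ⟨h1, h2⟩)
      exact_mod_cast congrArg (fun n : Nat => (n : Int)) hc
  rw [PySem.Dict.items_eq_map_keys D hnd 0, List.filter_map, List.map_map]
  have : ((fun (x : String × Int) => x.1) ∘ fun k => (k, D.getD k 0)) = id := rfl
  rw [this, List.map_id]
  have hfk : D.keys.filter ((fun p : String × Int => p.2 == ((u :: us).length : Int)) ∘ fun k => (k, D.getD k 0))
      = (PySem.Set.ofList (look u)).filter (fun x => us.all (fun v => (look v).contains x)) := by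
    rw [hkeys]
    rw [filter_foldl_update _ _ _ _ (by
      intro x hp
      simp only [Function.comp_def] at hp
      rw [hpred x] at hp
      exact (PySem.Set.mem_ofList _ _).mpr (by
        have := (Bool.and_eq_true _ _).mp hp
        simpa using this.1))]
    apply List.filter_congr
    intro x hx
    simp only [Function.comp_def]
    have hxl : (look u).contains x = true := by
      simpa using (PySem.Set.mem_ofList _ _).mp hx
    rw [hpred x, hxl, Bool.true_and]
  rw [hfk]
  exact PySem.Set.ofList_eq_self_of_nodup _ (List.Nodup.filter _ (PySem.Set.nodup_ofList _))

-- ===== VERDICT (by name: the statement is the Claim_ definition above) =====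
theorem get_types_for_usage_py_spec : Claim_equal_get_types_for_usage_py := by
  intro usage attr_types attrs _
  unfold Spec_get_types_for_usage_py get_types_for_usage_py get_types_for_usage_py_alt
  cases usage with
  | nil => rfl
  | cons u us =>
      simp only [List.isEmpty_cons, Bool.false_eq_true, if_false]
      rw [List.map_cons, List.drop_succ_cons, List.drop_zero, List.headD_cons]
      rw [show (us.map (fun v : String × Bool × Bool => (v.1, v.2.2))).foldl
            (fun ts key => PySem.Set.inter ts (pvLookup attr_types key))
            (PySem.Set.ofList (pvLookup attr_types (u.1, u.2.2)))
          = us.foldl (fun ts v => PySem.Set.inter ts ((fun v : String × Bool × Bool => pvLookup attr_types (v.1, v.2.2)) v))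
            (PySem.Set.ofList (pvLookup attr_types (u.1, u.2.2)))
        from List.foldl_map]
      rw [foldl_inter_eq_filter us (fun v => pvLookup attr_types (v.1, v.2.2))]
      exact (B_side_eq (fun v : String × Bool × Bool => pvLookup attr_types (v.1, v.2.2)) u us).symm
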